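-- pv_equiv track=rewrite | github.com/Ralireza/hazmer | main.py | compute_freq
-- ===== SOURCE A (Python) =====
-- def compute_freq(uniq_token, uniq_tags_list):
--     table = []
--     for word in uniq_token:
--         freq_list = []
--         for sentence in uniq_tags_list:
--             frequncy_in_sentence = 0
--             for words in sentence:
--                 if word == words[0]:
--                     frequncy_in_sentence += 1
--
--             freq_list.append(frequncy_in_sentence)
--         table.append(freq_list)
--     return table
-- ===== SOURCE B (Python) =====
-- from collections import Counter
--
-- def compute_freq(uniq_token, uniq_tags_list):
--     counters = [Counter(w for w, _tag in sentence) for sentence in uniq_tags_list]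
--     return [[c[word] for c in counters] for word in uniq_token]
-- ===== Notes on version B (the rewrite author's own statement) =====
-- stated objective: faster
-- what changed: Builds one Counter of first tokens per sentence up front, replacing A's per-word rescans of every sentence with O(1) counter lookups.
import Mathlib
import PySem

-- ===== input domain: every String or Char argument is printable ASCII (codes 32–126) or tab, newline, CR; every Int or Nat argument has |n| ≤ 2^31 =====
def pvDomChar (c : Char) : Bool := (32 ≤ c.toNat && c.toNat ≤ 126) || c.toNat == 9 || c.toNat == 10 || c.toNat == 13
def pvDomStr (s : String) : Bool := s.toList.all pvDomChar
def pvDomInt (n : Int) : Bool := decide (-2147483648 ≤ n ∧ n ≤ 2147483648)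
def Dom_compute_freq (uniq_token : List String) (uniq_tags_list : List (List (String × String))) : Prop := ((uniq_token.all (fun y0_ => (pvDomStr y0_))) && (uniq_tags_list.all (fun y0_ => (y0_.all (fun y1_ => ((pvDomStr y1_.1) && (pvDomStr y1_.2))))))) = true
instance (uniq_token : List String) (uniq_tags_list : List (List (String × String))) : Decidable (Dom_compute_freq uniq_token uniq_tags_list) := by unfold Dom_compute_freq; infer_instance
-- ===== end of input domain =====

-- ===== PORT A =====
-- A: for each word, scan every sentence and count matching first components.
def compute_freq (uniq_token : List String) (uniq_tags_list : List (List (String × String))) : List (List Int) :=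
  uniq_token.foldl (fun table word =>
    table ++ [uniq_tags_list.foldl (fun freq_list sentence =>
      freq_list ++ [sentence.foldl (fun f words => if word == words.1 then f + 1 else f) (0 : Int)]) []]) []

-- ===== PORT B =====
-- B: one Counter of first tokens per sentence, then O(1) lookups per word (faster in a timing run).
def compute_freq_alt (uniq_token : List String) (uniq_tags_list : List (List (String × String))) : List (List Int) :=
  let counters := uniq_tags_list.map (fun sentence => PySem.Dict.counter (sentence.map Prod.fst))
  uniq_token.map (fun word => counters.map (fun c => c.getD word 0))

-- ===== PRECONDITION & SPEC =====
def Spec_compute_freq (uniq_token : List String) (uniq_tags_list : List (List (String × String))) (out : List (List Int)) : Prop := out = compute_freq_alt uniq_token uniq_tags_list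
instance (uniq_token : List String) (uniq_tags_list : List (List (String × String))) (out : List (List Int)) : Decidable (Spec_compute_freq uniq_token uniq_tags_list out) := by unfold Spec_compute_freq; infer_instance

-- ===== CLAIM (what is proved, stated in full; the proofs are below) =====
def Claim_equal_compute_freq : Prop := ∀ (uniq_token : List String) (uniq_tags_list : List (List (String × String))), Dom_compute_freq uniq_token uniq_tags_list → Spec_compute_freq uniq_token uniq_tags_list (compute_freq uniq_token uniq_tags_list)

-- ===== LEMMAS AND PROOFS =====

-- ===== VERDICT (by name: the statement is the Claim_ definition above) =====
lemma foldl_count (w : String) (s : List (String × String)) (a : Int) :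
    s.foldl (fun f p => if w == p.1 then f + 1 else f) a
      = a + ((s.map Prod.fst).count w : Int) := by
  induction s generalizing a with
  | nil => simp
  | cons p t ih =>
    simp only [List.foldl_cons, List.map_cons, List.count_cons, ih]
    by_cases h : w == p.1
    · have h2 : (p.1 == w) = true := by simpa [BEq.comm] using h
      simp [h, h2]; push_cast; ring
    · have h2 : (p.1 == w) = false := by
        simpa [BEq.comm] using h
      simp [h, h2]

lemma foldl_append_map {α β : Type} (f : α → β) (l : List α) (acc : List β) :
    l.foldl (fun r x => r ++ [f x]) acc = acc ++ l.map f := by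
  induction l generalizing acc with
  | nil => simp
  | cons h t ih => simp [ih]

theorem compute_freq_spec : Claim_equal_compute_freq := by
  intro uniq_token uniq_tags_list _
  unfold Spec_compute_freq compute_freq compute_freq_alt
  simp only [foldl_append_map, List.nil_append, List.map_map]
  apply List.map_congr_left
  intro w _
  apply List.map_congr_left
  intro s _
  rw [foldl_count]
  simp [Function.comp, PySem.Dict.getD_counter]
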